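-- pv_equiv track=rewrite | github.com/schipkovalina/Programming | hw7.py | hoodsearch
-- ===== SOURCE A (Python) =====
-- def hoodsearch(f):
--     freq = {}
--     for x in range(len(f)):
--         if f[x][-4::] == "hood" or f[x][-5::] == "hoods":
--             if f[x] in freq:
--                 freq[f[x]] += 1
--             else:
--                 freq[f[x]] = 1
--     return freq
-- ===== SOURCE B (Python) =====
-- def hoodsearch(f):
--     matches = [w for w in f if w.endswith(("hood", "hoods"))]
--     s = sorted(matches)
--     counts = {}
--     i = 0
--     while i < len(s):
--         j = i + 1
--         while j < len(s) and s[j] == s[i]: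
--             j += 1
--         counts[s[i]] = j - i
--         i = j
--     return {w: counts[w] for w in dict.fromkeys(matches)}
-- ===== Notes on version B (the rewrite author's own statement) =====
-- stated objective: alternative
-- what changed: Replaces A's single-pass dict-increment tally with a sort-then-scan tabulation: B filters the matching words, sorts them and counts consecutive equal runs with a two-index while loop, then emits the counts in first-occurrence order via an ordered dedup.
import Mathlib
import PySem

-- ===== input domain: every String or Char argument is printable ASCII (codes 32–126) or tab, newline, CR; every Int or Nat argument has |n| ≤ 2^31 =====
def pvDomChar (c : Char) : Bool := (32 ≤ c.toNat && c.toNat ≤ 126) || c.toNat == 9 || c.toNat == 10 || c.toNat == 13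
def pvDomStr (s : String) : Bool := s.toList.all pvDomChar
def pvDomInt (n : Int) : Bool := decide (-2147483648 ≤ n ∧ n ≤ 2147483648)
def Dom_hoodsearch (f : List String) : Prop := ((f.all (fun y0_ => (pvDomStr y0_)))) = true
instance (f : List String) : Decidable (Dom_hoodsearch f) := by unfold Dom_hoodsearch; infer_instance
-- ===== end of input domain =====

-- B tabulates frequencies by sorting the matching words and counting consecutive equal runs
-- (sort-then-scan), then emits them in first-occurrence order; A increments a dict in one pass.

-- ===== PORT A =====
def hoodsearch (f : List String) : List (String × Int) :=
  let freq : PySem.Dict String Int :=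
    (PySem.List.pyRange 0 (PySem.List.len f)).foldl (fun freq x =>
      let w := PySem.List.pyGetD f x ""          -- f[x]; x drawn from range(len(f)), always in range
      if PySem.Str.slice w (some (-4)) none == "hood" ||
         PySem.Str.slice w (some (-5)) none == "hoods" then
        if freq.contains w then
          freq.insert w (freq.getD w 0 + 1)      -- freq[f[x]] += 1
        else
          freq.insert w 1                        -- freq[f[x]] = 1
      else freq) PySem.Dict.empty
  freq.items

-- ===== PORT B =====
-- Source B's outer while advances i run by run over the sorted list; ported on the suffix s.drop i:
-- the inner while that moves j past the elements equal to s[i] is the takeWhile/dropWhile split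
-- of that suffix (same run length j - i, same next suffix), exact step for step.
def hoodsearchRuns (s : List String) (counts : PySem.Dict String Int) :
    PySem.Dict String Int :=
  match s with
  | [] => counts
  | w :: rest =>
      -- counts[s[i]] = j - i  (= length of the equal run), then continue from j
      hoodsearchRuns (rest.dropWhile (fun x => x == w))
        (counts.insert w (((rest.takeWhile (fun x => x == w)).length + 1 : Nat) : Int))
termination_by s.length
decreasing_by
  simp only [List.length_cons]
  exact Nat.lt_succ_of_le (List.length_dropWhile_le _ _)

def hoodsearch_alt (f : List String) : List (String × Int) :=
  let ms := f.filter (fun w => PySem.Str.endswith w "hood" || PySem.Str.endswith w "hoods")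
  let counts := hoodsearchRuns (PySem.List.sorted ms (fun x => x) false) PySem.Dict.empty
  -- counts[w]: every key of dedup ms occurs in sorted ms, so the lookup never misses (getD exact)
  ((PySem.List.dedup ms).foldl (fun d w => d.insert w (counts.getD w 0)) PySem.Dict.empty).items

-- ===== PRECONDITION & SPEC =====
def Spec_hoodsearch (f : List String) (out : List (String × Int)) : Prop := out = hoodsearch_alt f
instance (f : List String) (out : List (String × Int)) : Decidable (Spec_hoodsearch f out) := by unfold Spec_hoodsearch; infer_instance

-- ===== CLAIM (what is proved, stated in full; the proofs are below) =====
def Claim_equal_hoodsearch : Prop := ∀ (f : List String), Dom_hoodsearch f → Spec_hoodsearch f (hoodsearch f)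

-- ===== LEMMAS AND PROOFS =====

-- w[-k:] == p  is exactly  w.endswith(p)  (for the literal suffixes used by A)
theorem slice_eq_endswith_hood (w : String) :
    (PySem.Str.slice w (some (-4)) none == "hood") = PySem.Str.endswith w "hood" := by
  rw [Bool.eq_iff_iff, beq_iff_eq, PySem.Str.endswith_eq, PySem.Chars.endswith_iff,
      List.suffix_iff_eq_drop, ← String.toList_inj, PySem.Str.toList_slice,
      PySem.Chars.slice_eq_listSlice, PySem.List.slice_some_none]
  simp [pysem]
  exact eq_comm

theorem slice_eq_endswith_hoods (w : String) :
    (PySem.Str.slice w (some (-5)) none == "hoods") = PySem.Str.endswith w "hoods" := by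
  rw [Bool.eq_iff_iff, beq_iff_eq, PySem.Str.endswith_eq, PySem.Chars.endswith_iff,
      List.suffix_iff_eq_drop, ← String.toList_inj, PySem.Str.toList_slice,
      PySem.Chars.slice_eq_listSlice, PySem.List.slice_some_none]
  simp [pysem]
  exact eq_comm

theorem getD_zero_of_not_contains (d : PySem.Dict String Int) (w : String)
    (h : d.contains w = false) : d.getD w 0 = 0 := by
  unfold PySem.Dict.getD
  rw [PySem.Dict.contains_eq_isSome_get?] at h
  cases hg : d.get? w <;> simp_all

-- A's loop body, with the contains-branch collapsed, is the counter update
theorem step_eq_counter_step (d : PySem.Dict String Int) (w : String) :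
    (if d.contains w then d.insert w (d.getD w 0 + 1) else d.insert w 1) =
      d.insert w (d.getD w 0 + 1) := by
  cases hc : d.contains w with
  | true => simp
  | false => simp [getD_zero_of_not_contains d w hc]

-- A's result is the ordered-dedup/count table of the matching words
theorem hoodsearch_eq_countmap (f : List String) :
    hoodsearch f =
      (PySem.List.dedup (f.filter (fun w =>
          PySem.Str.endswith w "hood" || PySem.Str.endswith w "hoods"))).map
        (fun w => (w, (PySem.List.count (f.filter (fun w =>
          PySem.Str.endswith w "hood" || PySem.Str.endswith w "hoods")) w : Int))) := by
  unfold hoodsearch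
  simp only [slice_eq_endswith_hood, slice_eq_endswith_hoods, step_eq_counter_step]
  have h := PySem.List.foldl_pyRange_pyGetD f ""
      (fun (freq : PySem.Dict String Int) w =>
        if PySem.Str.endswith w "hood" || PySem.Str.endswith w "hoods" then
          freq.insert w (freq.getD w 0 + 1) else freq)
      PySem.Dict.empty (a := 0) (by omega)
  rw [show ((0:Int).toNat = 0) from rfl, List.drop_zero] at h
  rw [h]
  simp only [← List.foldl_filter, PySem.Dict.foldl_insert_getD_add_one_eq_counter,
    PySem.Dict.items_counter, PySem.List.dedup_eq_ofList, PySem.List.count_eq]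

-- run-length scan over a sorted list: each key's entry is its count in the list
theorem hoodsearchRuns_getD (s : List String) (d : PySem.Dict String Int)
    (hs : s.Pairwise (· ≤ ·)) (w : String) :
    (hoodsearchRuns s d).getD w 0 =
      if w ∈ s then (s.count w : Int) else d.getD w 0 := by
  induction s, d using hoodsearchRuns.induct with
  | case1 d => simp [hoodsearchRuns]
  | case2 d v rest ih =>
    have hsplit : rest.takeWhile (fun x => x == v) ++ rest.dropWhile (fun x => x == v) = rest :=
      List.takeWhile_append_dropWhile
    have htk : ∀ x ∈ rest.takeWhile (fun x => x == v), x = v := by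
      intro x hx
      have := List.mem_takeWhile_imp hx
      simpa using this
    have hrest : rest.Pairwise (· ≤ ·) := hs.of_cons
    have hdrop : (rest.dropWhile (fun x => x == v)).Pairwise (· ≤ ·) :=
      hrest.sublist (List.dropWhile_sublist _)
    have hvle : ∀ x ∈ rest, v ≤ x := by
      intro x hx; exact (List.pairwise_cons.mp hs).1 x hx
    -- v does not occur in the dropped tail
    have hvnot : v ∉ rest.dropWhile (fun x => x == v) := by
      intro hmem
      rcases hd : rest.dropWhile (fun x => x == v) with _ | ⟨h0, t0⟩
      · simp [hd] at hmem
      · have hh0 : ¬ (h0 == v) = true := by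
          have := List.head?_dropWhile_not (p := fun x => x == v) (l := rest)
          rw [hd] at this
          simpa using this
        have hh0le : ∀ x ∈ t0, h0 ≤ x := by
          intro x hx
          exact (List.pairwise_cons.mp (hd ▸ hdrop)).1 x hx
        have hh0mem : h0 ∈ rest :=
          List.Sublist.mem (l₁ := rest.dropWhile (fun x => x == v))
            (by rw [hd]; exact List.mem_cons_self) (List.dropWhile_sublist _)
        have hvh0 : v ≤ h0 := hvle h0 hh0mem
        rw [hd] at hmem
        rcases List.mem_cons.mp hmem with h | h
        · exact hh0 (by simp [h])
        · exact hh0 (by simp [le_antisymm (hh0le v h) hvh0])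
    rw [hoodsearchRuns, ih hdrop]
    by_cases hwv : w = v
    · subst hwv
      rw [if_neg hvnot, PySem.Dict.getD_insert_self, if_pos (List.mem_cons_self)]
      have hcrest : List.count w rest = (rest.takeWhile (fun x => x == w)).length := by
        conv_lhs => rw [← hsplit]
        rw [List.count_append,
          List.count_eq_length.mpr (fun x hx => ((htk x hx).symm)),
          List.count_eq_zero.mpr hvnot, Nat.add_zero]
      rw [List.count_cons_self, hcrest]
    · have hne : w ≠ v := hwv
      rw [PySem.Dict.getD_insert_of_ne _ _ _ hne]
      have hcnt : List.count w (v :: rest) = List.count w (rest.dropWhile (fun x => x == v)) := by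
        have h1 : List.count w (v :: rest) = List.count w rest := by
          simp [Ne.symm hne]
        rw [h1]
        conv_lhs => rw [← hsplit]
        rw [List.count_append, List.count_eq_zero.mpr (fun hm => hne (htk w hm)), Nat.zero_add]
      have hmem_iff : w ∈ v :: rest ↔ w ∈ rest.dropWhile (fun x => x == v) := by
        constructor
        · intro h
          rcases List.mem_cons.mp h with h | h
          · exact absurd h hne
          · rw [← hsplit] at h
            rcases List.mem_append.mp h with h | h
            · exact absurd (htk w h) hne
            · exact h
        · intro h
          exact List.mem_cons.mpr (Or.inr (List.Sublist.mem h (List.dropWhile_sublist _)))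
      by_cases hw : w ∈ rest.dropWhile (fun x => x == v)
      · rw [if_pos hw, if_pos (hmem_iff.mpr hw), hcnt]
      · rw [if_neg hw, if_neg (fun h => hw (hmem_iff.mp h))]

-- ===== VERDICT (by name: the statement is the Claim_ definition above) =====
theorem hoodsearch_spec : Claim_equal_hoodsearch := by
  intro f _
  show hoodsearch f = hoodsearch_alt f
  rw [hoodsearch_eq_countmap]
  simp only [hoodsearch_alt]
  set ms := f.filter (fun w =>
    PySem.Str.endswith w "hood" || PySem.Str.endswith w "hoods") with hms
  set counts := hoodsearchRuns (PySem.List.sorted ms (fun x => x) false) PySem.Dict.empty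
    with hcounts
  have hit := PySem.Dict.items_foldl_insert_fresh (PySem.List.dedup ms) (fun w => w)
    (fun w => counts.getD w 0) PySem.Dict.empty
    (by intro a _; simp [pysem]) (by rw [List.map_id']; exact PySem.List.nodup_dedup ms)
  beta_reduce at hit
  rw [hit, show PySem.Dict.empty.items = ([] : List (String × Int)) from rfl, List.nil_append]
  apply List.map_congr_left
  intro w hw
  have hwm : w ∈ ms := (PySem.List.mem_dedup ms w).mp hw
  have hsort : w ∈ PySem.List.sorted ms (fun x => x) false :=
    (PySem.List.mem_sorted ms (fun x => x) false w).mpr hwm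
  rw [hcounts, hoodsearchRuns_getD _ _
      (by simpa using PySem.List.sorted_pairwise ms (fun x => x)) w,
    if_pos hsort, (PySem.List.sorted_perm ms (fun x => x) false).count_eq,
    PySem.List.count_eq]
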